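-- pv_equiv track=rewrite | github.com/andrewdavis3/bacterial-dna-analyzer-prokbert | prokbert_simple.py | _kmerize_sequence
-- ===== SOURCE A (Python) =====
-- def _kmerize_sequence(sequence: str, k: int = 6) -> str:
--     """
--     Convert DNA sequence to k-mer representation for tokenization.
--
--     Args:
--         sequence: DNA sequence
--         k: k-mer size
--
--     Returns:
--         Space-separated k-mers
--     """
--     sequence = sequence.upper()
--     kmers = []
--     for i in range(len(sequence) - k + 1):
--         kmer = sequence[i:i+k]
--         # Only add valid k-mers (A, T, G, C only)
--         if all(base in 'ATGC' for base in kmer):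
--             kmers.append(kmer)
--     return ' '.join(kmers)
-- ===== SOURCE B (Python) =====
-- def _kmerize_sequence(sequence: str, k: int = 6) -> str:
--     """Prefix counts of invalid bases give a constant-time validity test per window."""
--     s = sequence.upper()
--     bad = [0]  # bad[m] = number of non-ATGC characters among the first m characters
--     for c in s:
--         bad.append(bad[-1] + (c not in 'ATGC'))
--     n = len(s)
--     return ' '.join(s[i:i + k] for i in range(n - k + 1) if bad[i] == bad[i + k])
-- ===== Notes on version B (the rewrite author's own statement) =====
-- stated objective: faster
-- what changed: B precomputes a prefix-count table of invalid bases once and decides each window with two table lookups instead of A's per-window character scan; Pre_ excludes negative k, where A's string of empty windows joined by spaces is accidental and B raises IndexError.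
-- outside the precondition, e.g. on _kmerize_sequence('A', -1): A returns '  ', B raises IndexError
import Mathlib
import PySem

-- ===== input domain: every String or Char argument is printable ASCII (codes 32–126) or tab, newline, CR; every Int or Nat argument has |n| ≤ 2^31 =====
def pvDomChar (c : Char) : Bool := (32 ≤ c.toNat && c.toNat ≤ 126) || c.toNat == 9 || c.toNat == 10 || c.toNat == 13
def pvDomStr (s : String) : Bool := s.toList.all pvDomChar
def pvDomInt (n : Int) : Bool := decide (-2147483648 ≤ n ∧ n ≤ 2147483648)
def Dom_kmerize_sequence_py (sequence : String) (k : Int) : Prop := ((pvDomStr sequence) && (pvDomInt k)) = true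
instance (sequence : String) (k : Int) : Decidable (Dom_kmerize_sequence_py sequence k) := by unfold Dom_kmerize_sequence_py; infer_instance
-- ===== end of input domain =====

-- B replaces A's per-window character scan by a prefix count of invalid bases tested in O(1) per window.

-- ===== PORT A =====
def kmerize_sequence_py (sequence : String) (k : Int) : String :=
  let s := PySem.Str.upper sequence
  let kmers : List String := (PySem.List.pyRange 0 (PySem.Str.len s - k + 1) 1).foldl
    (fun kmers i =>
      let kmer := PySem.Str.slice s (some i) (some (i + k))
      -- 'base in "ATGC"' for the single character base = membership among its characters
      if kmer.toList.all (fun base => decide (base ∈ "ATGC".toList)) then kmers ++ [kmer] else kmers)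
    []
  PySem.Str.join " " kmers

-- ===== PORT B =====
def kmerize_sequence_py_alt (sequence : String) (k : Int) : String :=
  let s := PySem.Str.upper sequence
  -- bad[m] = number of non-ATGC characters among the first m characters of s
  let bad : List Int := s.toList.foldl
    (fun bad c => bad ++ [PySem.List.pyGetD bad (-1) 0 + (if decide (c ∈ "ATGC".toList) then 0 else 1)])
    [0]
  let n : Int := PySem.Str.len s
  PySem.Str.join " "
    (((PySem.List.pyRange 0 (n - k + 1) 1).filter
        (fun i => decide (PySem.List.pyGetD bad i 0 = PySem.List.pyGetD bad (i + k) 0))).map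
      (fun i => PySem.Str.slice s (some i) (some (i + k))))

-- ===== PRECONDITION & SPEC =====
-- Pre_ excludes negative k, where A returns an accidental string of spaces (every
-- degenerate window s[i:i+k] is empty and counted valid) while B's index bad[i]
-- runs past its table and raises IndexError.
def Pre_kmerize_sequence_py (sequence : String) (k : Int) : Prop := 0 ≤ k
instance (sequence : String) (k : Int) : Decidable (Pre_kmerize_sequence_py sequence k) := by unfold Pre_kmerize_sequence_py; infer_instance
def pvWitness_kmerize_sequence_py : String × Int := ("ATGCNA", 3)
def Spec_kmerize_sequence_py (sequence : String) (k : Int) (out : String) : Prop := out = kmerize_sequence_py_alt sequence k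
instance (sequence : String) (k : Int) (out : String) : Decidable (Spec_kmerize_sequence_py sequence k out) := by unfold Spec_kmerize_sequence_py; infer_instance

-- ===== CLAIM (what is proved, stated in full; the proofs are below) =====
def Claim_equal_kmerize_sequence_py : Prop := ∀ (sequence : String) (k : Int), Dom_kmerize_sequence_py sequence k → Pre_kmerize_sequence_py sequence k → Spec_kmerize_sequence_py sequence k (kmerize_sequence_py sequence k)

-- ===== LEMMAS AND PROOFS =====

-- the test 'c is not a valid base'
def pvInval (c : Char) : Bool := !decide (c ∈ "ATGC".toList)

-- the prefix-count list B builds is the table of invalid-base counts of the prefixes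
theorem pv_bad_spec (cs : List Char) :
    cs.foldl
      (fun bad c => bad ++ [PySem.List.pyGetD bad (-1) 0 + (if decide (c ∈ "ATGC".toList) then 0 else 1)])
      ([0] : List Int)
    = (List.range (cs.length + 1)).map (fun m => (((cs.take m).countP pvInval : Nat) : Int)) := by
  induction cs using List.reverseRecOn with
  | nil => simp
  | append_singleton cs c ih =>
    rw [List.foldl_append, ih, List.foldl_cons, List.foldl_nil]
    have hsplit : (List.range (cs.length + 1)).map (fun m => (((cs.take m).countP pvInval : Nat) : Int))
        = (List.range cs.length).map (fun m => (((cs.take m).countP pvInval : Nat) : Int))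
          ++ [(((cs.take cs.length).countP pvInval : Nat) : Int)] := by
      rw [List.range_succ, List.map_append, List.map_cons, List.map_nil]
    have hget : PySem.List.pyGetD
        ((List.range (cs.length + 1)).map (fun m => (((cs.take m).countP pvInval : Nat) : Int))) (-1) 0
        = (((cs.take cs.length).countP pvInval : Nat) : Int) := by
      rw [hsplit, PySem.List.pyGetD_neg_one_append_singleton]
    have hcong : (List.range (cs.length + 1)).map (fun m => ((((cs ++ [c]).take m).countP pvInval : Nat) : Int))
        = (List.range (cs.length + 1)).map (fun m => (((cs.take m).countP pvInval : Nat) : Int)) := by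
      apply List.map_congr_left
      intro m hm
      rw [List.mem_range] at hm
      rw [List.take_append_of_le_length (by omega)]
    have hlen : (cs ++ [c]).length + 1 = (cs.length + 1) + 1 := by simp
    rw [hget, hlen]
    conv_rhs => rw [List.range_succ, List.map_append, List.map_cons, List.map_nil, hcong]
    congr 1
    have h1 : (cs ++ [c]).take (cs.length + 1) = cs ++ [c] := by
      apply List.take_of_length_le
      simp
    rw [h1, List.take_length, List.countP_append]
    by_cases h : c ∈ "ATGC".toList <;> simp [pvInval] <;> split_ifs <;> simp_all

-- looking up the prefix-count table
theorem pv_bad_get (cs : List Char) (m : Int) (h0 : 0 ≤ m) (h1 : m ≤ (cs.length : Int)) :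
    PySem.List.pyGetD ((List.range (cs.length + 1)).map (fun j => (((cs.take j).countP pvInval : Nat) : Int))) m 0
    = (((cs.take m.toNat).countP pvInval : Nat) : Int) := by
  have hm : m = (m.toNat : Int) := by omega
  rw [hm, PySem.List.pyGetD_natCast, PySem.List.getD_map_range _ _ _ _ (by omega)]
  simp
  rw [show max m 0 = m from by omega]

-- A's per-window all-valid test coincides with B's two prefix-table lookups
theorem pv_test_eq (cs : List Char) (k i : Int) (hk : 0 ≤ k) (h0 : 0 ≤ i)
    (h1 : i + k ≤ (cs.length : Int)) :
    ((PySem.Chars.slice cs (some i) (some (i + k))).all fun base => decide (base ∈ "ATGC".toList))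
    = decide (PySem.List.pyGetD ((List.range (cs.length + 1)).map (fun m => (((cs.take m).countP pvInval : Nat) : Int))) i 0
        = PySem.List.pyGetD ((List.range (cs.length + 1)).map (fun m => (((cs.take m).countP pvInval : Nat) : Int))) (i + k) 0 : Prop) := by
  rw [pv_bad_get cs i h0 (by omega), pv_bad_get cs (i + k) (by omega) h1]
  simp only [PySem.Chars.slice]
  rw [PySem.List.slice_toNat cs h0 (by omega)]
  have htake : cs.take (i + k).toNat = cs.take i.toNat ++ (cs.drop i.toNat).take ((i + k).toNat - i.toNat) := by
    have h2 : (i + k).toNat = i.toNat + ((i + k).toNat - i.toNat) := by omega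
    conv_lhs => rw [h2]
    rw [List.take_add]
  rw [htake, List.countP_append]
  by_cases hB : ((cs.drop i.toNat).take ((i + k).toNat - i.toNat)).countP pvInval = 0
  · have hall : ((cs.drop i.toNat).take ((i + k).toNat - i.toNat)).all (fun base => decide (base ∈ "ATGC".toList)) = true := by
      rw [List.all_eq_true]
      intro a ha
      have := List.countP_eq_zero.mp hB a ha
      simp [pvInval] at this ⊢
      tauto
    rw [hall, hB]
    simp
  · have hall : ((cs.drop i.toNat).take ((i + k).toNat - i.toNat)).all (fun base => decide (base ∈ "ATGC".toList)) = false := by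
      rcases Bool.eq_false_or_eq_true (((cs.drop i.toNat).take ((i + k).toNat - i.toNat)).all fun base => decide (base ∈ "ATGC".toList)) with h | h
      · exfalso
        apply hB
        rw [List.countP_eq_zero]
        intro a ha
        rw [List.all_eq_true] at h
        have := h a ha
        simp [pvInval] at this ⊢
        tauto
      · exact h
    rw [hall]
    symm
    rw [decide_eq_false_iff_not]
    intro he
    apply hB
    omega

-- ===== VERDICT (by name: the statement is the Claim_ definition above) =====
theorem kmerize_sequence_py_spec : Claim_equal_kmerize_sequence_py := by
  intro sequence k _ hk
  show kmerize_sequence_py sequence k = kmerize_sequence_py_alt sequence k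
  unfold kmerize_sequence_py kmerize_sequence_py_alt
  simp only [PySem.Str.upper, PySem.Str.slice, PySem.Str.len, String.toList_ofList]
  set cs := PySem.Chars.upper sequence.toList with hcs
  rw [pv_bad_spec cs]
  rw [PySem.List.foldl_append_if]
  rw [List.nil_append]
  congr 1
  congr 1
  apply List.filter_congr
  intro i hi
  rw [PySem.List.mem_pyRange_one] at hi
  exact pv_test_eq cs k i hk hi.1 (by omega)
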